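-- pv_equiv track=rewrite | github.com/stephano0308-cloud/analyst-dashboard | scripts/crawl_telegram.py | find_stocks_in_text
-- ===== SOURCE A (Python) =====
-- def find_stocks_in_text(text, keywords):
--     """Find which portfolio stocks are mentioned in text."""
--     if not text: return set()
--     found = set()
--     text_upper = text.upper()
--     for kw, ticker in keywords.items():
--         if kw.upper() in text_upper:
--             found.add(ticker)
--     return found
-- ===== SOURCE B (Python) =====
-- def find_stocks_in_text(text, keywords):
--     """One left-to-right scan of the uppercased text: keywords are bucketed by their first
--     uppercase character, and at each position only the bucket of the current character is
--     prefix-matched; tickers are then emitted in keyword order."""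
--     if not text:
--         return set()
--     t = text.upper()
--     buckets = {}
--     for kw in keywords:
--         k = kw.upper()
--         buckets.setdefault(k[:1], []).append(k)
--     matched = set(buckets.get('', []))  # an empty keyword occurs in any nonempty text
--     for i, c in enumerate(t):
--         for k in buckets.get(c, ()):
--             if t.startswith(k, i):
--                 matched.add(k)
--     return {ticker for kw, ticker in keywords.items() if kw.upper() in matched}
-- ===== Notes on version B (the rewrite author's own statement) =====
-- stated objective: alternative
-- what changed: Instead of running a separate whole-text substring search for every keyword, B buckets the uppercased keywords by first character and makes one left-to-right scan of the uppercased text, prefix-matching at each position only the bucket of the current character, then emits tickers in keyword order from the matched set.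
import Mathlib
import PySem

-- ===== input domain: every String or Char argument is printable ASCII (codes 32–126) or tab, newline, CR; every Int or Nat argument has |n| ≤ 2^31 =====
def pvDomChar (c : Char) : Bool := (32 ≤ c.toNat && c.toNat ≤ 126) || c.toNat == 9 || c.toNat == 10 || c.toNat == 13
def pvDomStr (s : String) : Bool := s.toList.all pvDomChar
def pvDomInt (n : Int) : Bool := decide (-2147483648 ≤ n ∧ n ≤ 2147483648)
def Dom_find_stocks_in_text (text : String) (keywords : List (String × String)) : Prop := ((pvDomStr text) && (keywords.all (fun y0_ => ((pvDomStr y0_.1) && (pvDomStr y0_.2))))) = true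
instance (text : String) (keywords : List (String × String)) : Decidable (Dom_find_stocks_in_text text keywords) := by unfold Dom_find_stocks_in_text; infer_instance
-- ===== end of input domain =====

-- B replaces per-keyword substring searches over the whole text by one left-to-right scan that
-- prefix-matches, at each position, only the keywords bucketed under the current character
-- (objective: alternative).

-- ===== PORT A =====
-- A: if not text: return set(); found = set(); text_upper = text.upper();
--    for kw, ticker in keywords.items(): if kw.upper() in text_upper: found.add(ticker); return found
def find_stocks_in_text (text : String) (keywords : List (String × String)) : List String :=
  if text = "" then PySem.Set.empty
  else
    let text_upper := PySem.Str.upper text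
    (PySem.Dict.ofList keywords).items.foldl
      (fun found p =>
        if PySem.Str.isIn (PySem.Str.upper p.1) text_upper then PySem.Set.add found p.2 else found)
      PySem.Set.empty

-- ===== PORT B =====
-- 'for i, c in enumerate(t): for k in buckets.get(c, ()): if t.startswith(k, i): matched.add(k)'
-- ported as structural recursion over the suffix 't.drop i' (exact: t.startswith(k, i) for
-- 0 ≤ i < len(t) is k prefix of t[i:]; the inner add-loop is Set.update with the matching ones)
def pvScan (s : List Char) (buckets : PySem.Dict (List Char) (List (List Char)))
    (matched : PySem.Set (List Char)) : PySem.Set (List Char) :=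
  match s with
  | [] => matched
  | c :: rest =>
      pvScan rest buckets
        (PySem.Set.update matched
          ((buckets.getD [c] []).filter (fun k => k.isPrefixOf (c :: rest))))

def find_stocks_in_text_alt (text : String) (keywords : List (String × String)) : List String :=
  if text = "" then PySem.Set.empty
  else
    let t := PySem.Chars.upper text.toList
    let items := (PySem.Dict.ofList keywords).items
    -- buckets.setdefault(k[:1], []).append(k)  ==  modify with default [] and (· ++ [k])
    let buckets := items.foldl
      (fun d p => d.modify ((PySem.Chars.upper p.1.toList).take 1) []
        (fun l => l ++ [PySem.Chars.upper p.1.toList]))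
      PySem.Dict.empty
    let matched0 : PySem.Set (List Char) := PySem.Set.ofList (buckets.getD [] [])
    let matched := pvScan t buckets matched0
    items.foldl
      (fun found p =>
        if PySem.Set.contains matched (PySem.Chars.upper p.1.toList) then PySem.Set.add found p.2
        else found)
      PySem.Set.empty

-- ===== PRECONDITION & SPEC =====
def Spec_find_stocks_in_text (text : String) (keywords : List (String × String)) (out : List String) : Prop := out = find_stocks_in_text_alt text keywords
instance (text : String) (keywords : List (String × String)) (out : List String) : Decidable (Spec_find_stocks_in_text text keywords out) := by unfold Spec_find_stocks_in_text; infer_instance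

-- ===== CLAIM (what is proved, stated in full; the proofs are below) =====
def Claim_equal_find_stocks_in_text : Prop := ∀ (text : String) (keywords : List (String × String)), Dom_find_stocks_in_text text keywords → Spec_find_stocks_in_text text keywords (find_stocks_in_text text keywords)

-- ===== LEMMAS AND PROOFS =====

-- membership in the scan result: already in matched, or bucketed under some suffix's first
-- character and a prefix of that suffix
theorem pvScan_mem (s : List Char) (buckets : PySem.Dict (List Char) (List (List Char)))
    (matched : PySem.Set (List Char)) (K : List Char) :
    K ∈ pvScan s buckets matched ↔
      K ∈ matched ∨ ∃ j, j < s.length ∧ K ∈ buckets.getD ((s.drop j).take 1) [] ∧ K <+: s.drop j := by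
  induction s generalizing matched with
  | nil => simp [pvScan]
  | cons c rest ih =>
      rw [pvScan, ih]
      have hupd : K ∈ PySem.Set.update matched
            ((buckets.getD [c] []).filter (fun k => k.isPrefixOf (c :: rest)))
          ↔ K ∈ matched ∨ (K ∈ buckets.getD [c] [] ∧ K <+: (c :: rest)) := by
        show K ∈ List.foldl (fun s b => PySem.Set.add s b) matched _ ↔ _
        have hfold := PySem.Set.mem_foldl_add
          ((buckets.getD [c] []).filter (fun k => k.isPrefixOf (c :: rest))) (fun k => k) matched K
        simp only [hfold, List.mem_filter, List.isPrefixOf_iff_prefix]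
        constructor
        · rintro (h | ⟨b, ⟨hb, hp⟩, rfl⟩)
          · exact Or.inl h
          · exact Or.inr ⟨hb, hp⟩
        · rintro (h | ⟨hb, hp⟩)
          · exact Or.inl h
          · exact Or.inr ⟨K, ⟨hb, hp⟩, rfl⟩
      rw [hupd]
      constructor
      · rintro ((h | ⟨hb, hpre⟩) | ⟨j, hj, hb, hdrop⟩)
        · exact Or.inl h
        · exact Or.inr ⟨0, by simp, by simpa using hb, by simpa using hpre⟩
        · exact Or.inr ⟨j + 1, by simpa using hj, by simpa using hb, by simpa using hdrop⟩
      · rintro (h | ⟨j, hj, hb, hdrop⟩)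
        · exact Or.inl (Or.inl h)
        · match j with
          | 0 => exact Or.inl (Or.inr ⟨by simpa using hb, by simpa using hdrop⟩)
          | j + 1 => exact Or.inr ⟨j, by simpa using hj, by simpa using hb, by simpa using hdrop⟩

-- bounded-suffix match equals Python's substring test on a nonempty text
theorem pvMatch_iff_isIn (K t : List Char) (ht : t ≠ []) :
    (∃ j, j < t.length ∧ K <+: t.drop j) ↔ PySem.Chars.isIn K t = true := by
  rw [← PySem.Chars.exists_prefix_drop_iff_isIn]
  constructor
  · rintro ⟨j, _, hdrop⟩; exact ⟨j, hdrop⟩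
  · rintro ⟨j, hdrop⟩
    by_cases hK : K = []
    · subst hK
      exact ⟨0, by simpa using List.length_pos_of_ne_nil ht, by simp⟩
    · refine ⟨j, ?_, hdrop⟩
      by_contra hj
      have : t.drop j = [] := List.drop_eq_nil_of_le (by omega)
      rw [this] at hdrop
      exact hK (List.prefix_nil.mp hdrop)

-- each bucket holds exactly the uppercased keywords whose first character names the bucket
theorem pvBucket_getD (items : List (String × String)) (q : List Char) :
    (items.foldl
      (fun d p => d.modify ((PySem.Chars.upper p.1.toList).take 1) []
        (fun l => l ++ [PySem.Chars.upper p.1.toList]))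
      PySem.Dict.empty).getD q []
    = ((items.filter (fun p => (PySem.Chars.upper p.1.toList).take 1 == q)).map
        (fun p => PySem.Chars.upper p.1.toList)) := by
  have hmap : items.foldl
      (fun d p => d.modify ((PySem.Chars.upper p.1.toList).take 1) []
        (fun l => l ++ [PySem.Chars.upper p.1.toList]))
      PySem.Dict.empty
      = (items.map (fun p => ((PySem.Chars.upper p.1.toList).take 1,
          PySem.Chars.upper p.1.toList))).foldl
        (fun d p => d.modify p.1 [] (fun l => l ++ [p.2])) PySem.Dict.empty := by
    rw [List.foldl_map]
  rw [hmap, PySem.Dict.getD_foldl_modify_append]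
  simp [PySem.Dict.getD_empty, List.filter_map, Function.comp_def]

theorem find_stocks_aux (text : String) (keywords : List (String × String)) :
    find_stocks_in_text text keywords = find_stocks_in_text_alt text keywords := by
  unfold find_stocks_in_text find_stocks_in_text_alt
  by_cases h : text = ""
  · simp [h]
  · simp only [h, if_false]
    apply PySem.List.foldl_congr_mem
    intro acc p hp
    set t := PySem.Chars.upper text.toList with htdef
    set items := (PySem.Dict.ofList keywords).items with hidef
    set K := PySem.Chars.upper p.1.toList with hKdef
    have ht : t ≠ [] := by
      have : text.toList ≠ [] := by simp [String.toList_eq_nil_iff, h]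
      simpa [htdef, PySem.Chars.upper] using this
    set buckets := items.foldl
      (fun d p => d.modify ((PySem.Chars.upper p.1.toList).take 1) []
        (fun l => l ++ [PySem.Chars.upper p.1.toList]))
      PySem.Dict.empty with hbdef
    have hbucket : ∀ q, buckets.getD q []
        = ((items.filter (fun p => (PySem.Chars.upper p.1.toList).take 1 == q)).map
            (fun p => PySem.Chars.upper p.1.toList)) := fun q => pvBucket_getD items q
    have hmem0 : ∀ L, L ∈ PySem.Set.ofList (buckets.getD [] []) ↔ L ∈ buckets.getD [] [] := by
      intro L
      rw [← PySem.List.dedup_eq_ofList, PySem.List.mem_dedup]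
    -- the scanned matched-set decides exactly Python's substring test for each keyword
    have hcond : PySem.Set.contains
        (pvScan t buckets (PySem.Set.ofList (buckets.getD [] []))) K
        = PySem.Chars.isIn K t := by
      by_cases hK : K = []
      · have hin : K ∈ PySem.Set.ofList (buckets.getD [] []) := by
          rw [hmem0, hbucket]
          refine List.mem_map.mpr ⟨p, List.mem_filter.mpr ⟨hp, ?_⟩, rfl⟩
          have h' : PySem.Chars.upper p.1.toList = [] := hK
          simp [h']
        have hc : PySem.Set.contains (pvScan t buckets (PySem.Set.ofList (buckets.getD [] []))) K = true := by
          rw [PySem.Set.contains_iff, pvScan_mem]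
          exact Or.inl hin
        rw [hc, hK, PySem.Chars.isIn_nil]
      · have hnot0 : K ∉ PySem.Set.ofList (buckets.getD [] []) := by
          rw [hmem0, hbucket]
          intro hc
          rcases List.mem_map.mp hc with ⟨p', hp', hup⟩
          have := (List.mem_filter.mp hp').2
          rw [hup] at this
          exact hK (by simpa [List.take_eq_nil_iff] using this)
        by_cases hin : PySem.Chars.isIn K t = true
        · rw [hin, PySem.Set.contains_iff, pvScan_mem]
          rcases (pvMatch_iff_isIn K t ht).mpr hin with ⟨j, hj, hdrop⟩
          refine Or.inr ⟨j, hj, ?_, hdrop⟩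
          rw [hbucket]
          refine List.mem_map.mpr ⟨p, List.mem_filter.mpr ⟨hp, ?_⟩, rfl⟩
          -- K is a nonempty prefix of t.drop j, so their first characters agree
          rcases hdrop with ⟨tail, htail⟩
          rw [← hKdef, ← htail, List.take_append_of_le_length]
          · simp
          · exact Nat.one_le_iff_ne_zero.mpr (by simpa [List.length_eq_zero_iff] using hK)
        · rw [Bool.not_eq_true] at hin
          rw [hin, ← Bool.not_eq_true, PySem.Set.contains_iff, pvScan_mem]
          rintro (h0 | ⟨j, hj, _, hdrop⟩)
          · exact hnot0 h0
          · have : PySem.Chars.isIn K t = true := (pvMatch_iff_isIn K t ht).mp ⟨j, hj, hdrop⟩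
            simp [this] at hin
    have hstr : PySem.Str.isIn (PySem.Str.upper p.1) (PySem.Str.upper text)
        = PySem.Chars.isIn K t := by
      simp [PySem.Str.isIn_eq, PySem.Str.toList_upper, hKdef, htdef]
    rw [hstr, hcond]

-- ===== VERDICT (by name: the statement is the Claim_ definition above) =====
theorem find_stocks_in_text_spec : Claim_equal_find_stocks_in_text := by
  intro text keywords _
  exact find_stocks_aux text keywords
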